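-- pv_equiv track=rewrite | github.com/arancaytar/adventofcode | 2025/1/main.py | count3
-- ===== SOURCE A (Python) =====
-- def count3(start, turns):
--     current = start
--     zeroes = 0
--     for turn in turns:
--         step = 1 if turn > 0 else -1
--         for i in range(0, turn, step):
--             current += step
--             if current % 100 == 0:
--                 zeroes += 1
--         yield zeroes
-- ===== SOURCE B (Python) =====
-- def count3(start, turns):
--     current = start
--     zeroes = 0
--     for turn in turns:
--         nxt = current + turn
--         if turn > 0:
--             zeroes += nxt // 100 - current // 100
--         else:
--             zeroes += (current - 1) // 100 - (nxt - 1) // 100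
--         current = nxt
--         yield zeroes
-- ===== Notes on version B (the rewrite author's own statement) =====
-- stated objective: faster
-- what changed: Replaces A's unit-step walk over every integer in each turn (counting each time current lands on a multiple of 100) by a closed-form floor-division count of the multiples of 100 crossed per turn.
import Mathlib
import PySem

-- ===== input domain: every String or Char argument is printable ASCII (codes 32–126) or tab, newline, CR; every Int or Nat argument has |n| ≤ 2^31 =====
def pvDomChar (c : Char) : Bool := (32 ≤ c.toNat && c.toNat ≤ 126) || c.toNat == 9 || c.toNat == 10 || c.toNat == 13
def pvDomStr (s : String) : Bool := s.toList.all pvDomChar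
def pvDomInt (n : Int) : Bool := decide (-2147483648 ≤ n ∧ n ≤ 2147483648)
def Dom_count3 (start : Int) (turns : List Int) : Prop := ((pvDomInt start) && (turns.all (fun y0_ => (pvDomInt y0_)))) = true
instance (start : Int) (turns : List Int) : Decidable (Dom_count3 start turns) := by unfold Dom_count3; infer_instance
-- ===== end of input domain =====

-- B replaces A's step-by-step walk over each turn by a closed-form floor-division
-- count of the multiples of 100 crossed per turn (objective: faster, asymptotic).

-- ===== PORT A =====
-- inner loop of A: 'for i in range(0, turn, step): current += step; if current % 100 == 0: zeroes += 1'
def count3Inner (step : Int) (p : Int × Int) (_ : Int) : Int × Int :=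
  let current := p.1 + step
  (current, if PySem.Int.mod current 100 = 0 then p.2 + 1 else p.2)

def count3 (start : Int) (turns : List Int) : List Int :=
  (turns.foldl
    (fun (st : (Int × Int) × List Int) turn =>
      let step : Int := if turn > 0 then 1 else -1
      let p := (PySem.List.pyRange 0 turn step).foldl (count3Inner step) st.1
      (p, st.2 ++ [p.2]))
    ((start, 0), [])).2

-- ===== PORT B =====
def count3_alt (start : Int) (turns : List Int) : List Int :=
  (turns.foldl
    (fun (st : (Int × Int) × List Int) turn =>
      let current := st.1.1
      let nxt := current + turn
      let zeroes :=
        if turn > 0 then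
          st.1.2 + (PySem.Int.floordiv nxt 100 - PySem.Int.floordiv current 100)
        else
          st.1.2 + (PySem.Int.floordiv (current - 1) 100 - PySem.Int.floordiv (nxt - 1) 100)
      ((nxt, zeroes), st.2 ++ [zeroes]))
    ((start, 0), [])).2

-- ===== PRECONDITION & SPEC =====
def Spec_count3 (start : Int) (turns : List Int) (out : List Int) : Prop := out = count3_alt start turns
instance (start : Int) (turns : List Int) (out : List Int) : Decidable (Spec_count3 start turns out) := by unfold Spec_count3; infer_instance

-- ===== CLAIM (what is proved, stated in full; the proofs are below) =====
def Claim_equal_count3 : Prop := ∀ (start : Int) (turns : List Int), Dom_count3 start turns → Spec_count3 start turns (count3 start turns)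

-- ===== LEMMAS AND PROOFS =====

-- inner loop, ascending: list length alone matters; n steps of +1 count the multiples of 100 in (c, c+n]
lemma count3Inner_pos_list : ∀ (l : List Int) (c z : Int),
    l.foldl (count3Inner 1) (c, z)
      = (c + l.length, z + (PySem.Int.floordiv (c + l.length) 100 - PySem.Int.floordiv c 100)) := by
  intro l
  induction l with
  | nil =>
    intro c z
    simp
  | cons x t ih =>
    intro c z
    simp only [List.foldl_cons, count3Inner, List.length_cons]
    rw [ih]
    rw [PySem.Int.mod_eq_emod_of_pos (by norm_num : (0:Int) < 100)]
    simp only [PySem.Int.floordiv_eq_ediv_of_pos (by norm_num : (0:Int) < 100)]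
    rw [Prod.mk.injEq]
    constructor
    · push_cast; ring
    · have h1 : c + 1 + (t.length : Int) = c + ((t.length : Int) + 1) := by ring
      rw [h1]; push_cast
      split_ifs with h <;> omega

-- inner loop, descending: n steps of -1 count the multiples of 100 in [c-n, c)
lemma count3Inner_neg_list : ∀ (l : List Int) (c z : Int),
    l.foldl (count3Inner (-1)) (c, z)
      = (c - l.length, z + (PySem.Int.floordiv (c - 1) 100 - PySem.Int.floordiv (c - l.length - 1) 100)) := by
  intro l
  induction l with
  | nil =>
    intro c z
    simp
  | cons x t ih =>
    intro c z
    simp only [List.foldl_cons, count3Inner, List.length_cons]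
    rw [show c + (-1) = c - 1 from by ring, ih]
    rw [PySem.Int.mod_eq_emod_of_pos (by norm_num : (0:Int) < 100)]
    simp only [PySem.Int.floordiv_eq_ediv_of_pos (by norm_num : (0:Int) < 100)]
    rw [Prod.mk.injEq]
    constructor
    · push_cast; ring
    · have h1 : c - 1 - (t.length : Int) - 1 = c - ((t.length : Int) + 1) - 1 := by ring
      rw [h1]; push_cast
      split_ifs with h <;> omega

-- the two outer folds run in lockstep over the turns
lemma count3_fold_eq : ∀ (turns : List Int) (c z : Int) (acc : List Int),
    turns.foldl
      (fun (st : (Int × Int) × List Int) turn =>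
        let step : Int := if turn > 0 then 1 else -1
        let p := (PySem.List.pyRange 0 turn step).foldl (count3Inner step) st.1
        (p, st.2 ++ [p.2]))
      ((c, z), acc)
    = turns.foldl
      (fun (st : (Int × Int) × List Int) turn =>
        let current := st.1.1
        let nxt := current + turn
        let zeroes :=
          if turn > 0 then
            st.1.2 + (PySem.Int.floordiv nxt 100 - PySem.Int.floordiv current 100)
          else
            st.1.2 + (PySem.Int.floordiv (current - 1) 100 - PySem.Int.floordiv (nxt - 1) 100)
        ((nxt, zeroes), st.2 ++ [zeroes]))
      ((c, z), acc) := by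
  intro turns
  induction turns with
  | nil => intro c z acc; rfl
  | cons turn rest ih =>
    intro c z acc
    simp only [List.foldl_cons]
    by_cases h : turn > 0
    · rw [if_pos h, if_pos h]
      rw [count3Inner_pos_list]
      rw [PySem.List.length_pyRange_one]
      have hc : ((turn - 0).toNat : Int) = turn := by omega
      rw [hc, ih]
    · rw [if_neg h, if_neg h]
      rw [count3Inner_neg_list]
      rw [PySem.List.length_pyRange_neg_one]
      have hc : ((0 - turn).toNat : Int) = -turn := by omega
      rw [hc]
      rw [show c - -turn = c + turn from by ring]
      exact ih _ _ _

-- ===== VERDICT (by name: the statement is the Claim_ definition above) =====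
theorem count3_spec : Claim_equal_count3 := by
  intro start turns _
  unfold Spec_count3 count3 count3_alt
  rw [count3_fold_eq]
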